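-- pv_equiv track=rewrite | github.com/Daham-Mustaf/semantic-policy-generation | evaluation/ground_truth_draft_generation/main.py | clean_ttl_content
-- ===== SOURCE A (Python) =====
-- def clean_ttl_content(text: str) -> str:
--     cleaned_lines = []
--     previous_blank = False
--
--     for raw_line in text.splitlines():
--         line = raw_line.rstrip()
--         stripped = line.strip()
--
--         if not stripped:
--             if not previous_blank:
--                 cleaned_lines.append("")
--             previous_blank = True
--             continue
--
--         if stripped.startswith("#") or stripped.startswith("```"):
--             continue
--
--         cleaned_lines.append(line)
--         previous_blank = False
--
--     return "\n".join(cleaned_lines).strip() + "\n"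
-- ===== SOURCE B (Python) =====
-- from itertools import groupby
--
--
-- def clean_ttl_content(text: str) -> str:
--     # Pass 1: rstrip every line and drop comment/code-fence lines.
--     kept = []
--     for raw_line in text.splitlines():
--         line = raw_line.rstrip()
--         stripped = line.strip()
--         if stripped.startswith("#") or stripped.startswith("```"):
--             continue
--         kept.append(line)
--     # Pass 2: collapse each run of blank lines to a single blank line.
--     result = []
--     for is_blank, group in groupby(kept, key=lambda l: l == ""):
--         if is_blank:
--             result.append("")
--         else:
--             result.extend(group)
--     return "\n".join(result).strip() + "\n"
-- ===== Notes on version B (the rewrite author's own statement) =====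
-- stated objective: alternative
-- what changed: Replaces A's single pass with a previous_blank flag by two passes: a filter pass that rstrips lines and drops comment/fence lines, then an itertools.groupby pass that collapses each run of blank lines to one blank.
import Mathlib
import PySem

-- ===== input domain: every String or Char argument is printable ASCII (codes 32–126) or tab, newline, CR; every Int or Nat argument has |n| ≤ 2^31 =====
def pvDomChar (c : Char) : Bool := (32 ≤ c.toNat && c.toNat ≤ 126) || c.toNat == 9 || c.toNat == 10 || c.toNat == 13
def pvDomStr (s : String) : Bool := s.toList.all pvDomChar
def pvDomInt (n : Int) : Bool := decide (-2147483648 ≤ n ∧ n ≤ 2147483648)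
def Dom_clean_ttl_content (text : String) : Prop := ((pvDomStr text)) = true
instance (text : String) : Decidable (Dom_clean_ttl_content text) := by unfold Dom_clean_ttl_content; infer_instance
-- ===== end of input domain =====

-- B replaces A's previous_blank flag with two passes — filter/rstrip, then a groupby-based
-- collapse of blank runs — same result, different decomposition (objective: alternative).

-- ===== PORT A =====
-- the body of A's for-loop, acting on the state (cleaned_lines, previous_blank)
def pvStepA (st : List String × Bool) (raw_line : String) : List String × Bool :=
  let line := PySem.Str.rstrip raw_line
  let stripped := PySem.Str.strip line
  if stripped = "" then
    (if st.2 then st.1 else st.1 ++ [""], true)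
  else if PySem.Str.startswith stripped "#" || PySem.Str.startswith stripped "```" then
    st
  else
    (st.1 ++ [line], false)

def clean_ttl_content (text : String) : String :=
  let st := (PySem.Str.splitlines text).foldl pvStepA ([], false)
  PySem.Str.strip (PySem.Str.join "\n" st.1) ++ "\n"

-- ===== PORT B =====
-- pass 1 body: rstrip, drop comment/fence lines
def pvKeep (raw_line : String) : Option String :=
  let line := PySem.Str.rstrip raw_line
  let stripped := PySem.Str.strip line
  if PySem.Str.startswith stripped "#" || PySem.Str.startswith stripped "```" then none
  else some line

-- itertools.groupby specialised to a Bool key: maximal runs of equal key, with their key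
def pvGroupby (key : String → Bool) : List String → List (Bool × List String)
  | [] => []
  | x :: xs =>
    let k := key x
    (k, x :: xs.takeWhile (fun y => key y == k)) :: pvGroupby key (xs.dropWhile (fun y => key y == k))
termination_by l => l.length
decreasing_by
  simpa using Nat.lt_succ_of_le (List.length_dropWhile_le _ _)

def clean_ttl_content_alt (text : String) : String :=
  let kept := (PySem.Str.splitlines text).filterMap pvKeep
  let result := (pvGroupby (fun l => l == "") kept).flatMap (fun g => if g.1 then [""] else g.2)
  PySem.Str.strip (PySem.Str.join "\n" result) ++ "\n"

-- ===== PRECONDITION & SPEC =====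
def Spec_clean_ttl_content (text : String) (out : String) : Prop := out = clean_ttl_content_alt text
instance (text : String) (out : String) : Decidable (Spec_clean_ttl_content text out) := by unfold Spec_clean_ttl_content; infer_instance

-- ===== CLAIM (what is proved, stated in full; the proofs are below) =====
def Claim_equal_clean_ttl_content : Prop := ∀ (text : String), Dom_clean_ttl_content text → Spec_clean_ttl_content text (clean_ttl_content text)

-- ===== LEMMAS AND PROOFS =====

-- reference collapse: drop a blank when the previous emitted kept line was blank
def pvCollapseF : Bool → List String → List String
  | _, [] => []
  | prev, x :: xs =>
    if x = "" then (if prev then pvCollapseF true xs else "" :: pvCollapseF true xs)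
    else x :: pvCollapseF false xs

-- a whitespace-only line is empty after rstrip
theorem pv_rstrip_all_space (raw : String)
    (h : ∀ x ∈ (PySem.Str.rstrip raw).toList, PySem.Chars.isspace x = true) :
    PySem.Str.rstrip raw = "" := by
  have hts := PySem.Str.toList_rstrip raw
  unfold PySem.Chars.rstrip at hts
  cases hdc : List.dropWhile PySem.Chars.isspace raw.toList.reverse with
  | nil =>
    have h0 : (PySem.Str.rstrip raw).toList = [] := by rw [hts, hdc]; rfl
    have h3 := congrArg String.ofList h0
    rw [String.ofList_toList] at h3
    simpa using h3
  | cons c cs =>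
    exfalso
    have hmem : c ∈ (PySem.Str.rstrip raw).toList := by
      rw [hts, hdc]; simp
    have h1 : PySem.Chars.isspace c = true := h c hmem
    have h2 := List.head?_dropWhile_not PySem.Chars.isspace raw.toList.reverse
    rw [hdc] at h2
    simp at h2
    rw [h2] at h1
    cases h1

-- strip s = "" forces every character of s to be whitespace
theorem pv_strip_empty_all_space (s : String) (h : PySem.Str.strip s = "") :
    ∀ x ∈ s.toList, PySem.Chars.isspace x = true := by
  intro x hx
  have hts : PySem.Chars.strip s.toList = [] := by
    have := PySem.Str.toList_strip s
    rw [h] at this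
    exact this.symm
  unfold PySem.Chars.strip PySem.Chars.rstrip at hts
  have h1 : List.dropWhile PySem.Chars.isspace (PySem.Chars.lstrip s.toList).reverse = [] := by
    have := congrArg List.reverse hts
    simpa using this
  have h2 : ∀ y ∈ (PySem.Chars.lstrip s.toList).reverse, PySem.Chars.isspace y = true :=
    List.dropWhile_eq_nil_iff.mp h1
  have h3 : ∀ y ∈ PySem.Chars.lstrip s.toList, PySem.Chars.isspace y = true := by
    intro y hy; exact h2 y (by simpa using hy)
  -- s.toList = takeWhile isspace ++ lstrip
  have h4 := List.takeWhile_append_dropWhile (p := PySem.Chars.isspace) (l := s.toList)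
  unfold PySem.Chars.lstrip at h3
  rw [← h4] at hx
  rcases List.mem_append.mp hx with hx | hx
  · exact List.mem_takeWhile_imp hx
  · exact h3 x hx

theorem pv_blank_line (raw : String) (h : PySem.Str.strip (PySem.Str.rstrip raw) = "") :
    PySem.Str.rstrip raw = "" := by
  apply pv_rstrip_all_space
  intro x hx
  exact pv_strip_empty_all_space _ h x hx

-- A's loop computes collapseF over the filtered lines
theorem pv_foldA (ls : List String) (acc : List String) (prev : Bool) :
    (ls.foldl pvStepA (acc, prev)).1 = acc ++ pvCollapseF prev (ls.filterMap pvKeep) := by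
  induction ls generalizing acc prev with
  | nil => simp [pvCollapseF]
  | cons raw ls ih =>
    by_cases h1 : PySem.Str.strip (PySem.Str.rstrip raw) = ""
    · have hline : PySem.Str.rstrip raw = "" := pv_blank_line raw h1
      have hkeep : pvKeep raw = some "" := by
        simp [pvKeep, hline, show PySem.Str.strip "" = "" from by decide,
              show PySem.Chars.startswith [] ['#'] = false from by decide,
              show PySem.Chars.startswith [] ['`', '`', '`'] = false from by decide]
      have hstep : pvStepA (acc, prev) raw = (if prev then acc else acc ++ [""], true) := by
        simp [pvStepA, h1]
      rw [List.foldl_cons, hstep, List.filterMap_cons, hkeep, ih]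
      cases prev with
      | true => simp [pvCollapseF]
      | false => simp [pvCollapseF]
    · by_cases h2 : (PySem.Str.startswith (PySem.Str.strip (PySem.Str.rstrip raw)) "#"
          || PySem.Str.startswith (PySem.Str.strip (PySem.Str.rstrip raw)) "```") = true
      · simp at h2
        have hkeep : pvKeep raw = none := by
          rcases h2 with h2 | h2 <;> simp [pvKeep, h2]
        have hstep : pvStepA (acc, prev) raw = (acc, prev) := by
          rcases h2 with h2 | h2 <;> simp [pvStepA, h1, h2]
        rw [List.foldl_cons, hstep, List.filterMap_cons, hkeep, ih]
      · have hkeep : pvKeep raw = some (PySem.Str.rstrip raw) := by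
          simp at h2
          simp [pvKeep, h2]
        have hstep : pvStepA (acc, prev) raw = (acc ++ [PySem.Str.rstrip raw], false) := by
          simp at h2
          simp [pvStepA, h1, h2]
        have hne : PySem.Str.rstrip raw ≠ "" := by
          intro he
          apply h1
          rw [he]
          decide
        rw [List.foldl_cons, hstep, List.filterMap_cons, hkeep, ih]
        simp [pvCollapseF, hne]

theorem pv_collapse_true_blanks (r t : List String) (h : ∀ y ∈ r, y = "") :
    pvCollapseF true (r ++ t) = pvCollapseF true t := by
  induction r with
  | nil => rfl
  | cons x xs ih =>
    have hx : x = "" := h x (by simp)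
    simp only [List.cons_append, pvCollapseF, hx]
    exact ih (fun y hy => h y (by simp [hy]))

theorem pv_collapse_false_nonblanks (r t : List String) (h : ∀ y ∈ r, y ≠ "") :
    pvCollapseF false (r ++ t) = r ++ pvCollapseF false t := by
  induction r with
  | nil => rfl
  | cons x xs ih =>
    have hx : x ≠ "" := h x (by simp)
    simp only [List.cons_append, pvCollapseF, if_neg hx]
    rw [ih (fun y hy => h y (by simp [hy]))]

theorem pv_collapse_head_nonblank (t : List String)
    (h : ∀ z, t.head? = some z → z ≠ "") :
    pvCollapseF true t = pvCollapseF false t := by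
  cases t with
  | nil => rfl
  | cons z t =>
    have hz : z ≠ "" := h z rfl
    simp [pvCollapseF, hz]

-- B's groupby-collapse equals collapseF from a non-blank start
theorem pv_groupby_collapse (n : Nat) (l : List String) (hn : l.length ≤ n) :
    (pvGroupby (fun x => x == "") l).flatMap (fun g => if g.1 then [""] else g.2)
      = pvCollapseF false l := by
  induction n generalizing l with
  | zero =>
    rw [List.eq_nil_of_length_eq_zero (Nat.le_zero.mp hn)]
    simp [pvGroupby, pvCollapseF]
  | succ n ih =>
    cases l with
    | nil => simp [pvGroupby, pvCollapseF]
    | cons x xs =>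
      rw [pvGroupby]
      set run := xs.takeWhile (fun y => (y == "") == (x == "")) with hrun
      set rest := xs.dropWhile (fun y => (y == "") == (x == "")) with hrest
      have hxs : run ++ rest = xs := List.takeWhile_append_dropWhile
      have hrestlen : rest.length ≤ n := by
        have hdw := List.length_dropWhile_le (fun y => (y == "") == (x == "")) xs
        rw [← hrest] at hdw
        simp at hn
        omega
      have hih := ih rest hrestlen
      by_cases hx : x = ""
      · have hk : (x == "") = true := by simp [hx]
        have hrunb : ∀ y ∈ run, y = "" := by
          intro y hy
          have := List.mem_takeWhile_imp hy
          rw [hk] at this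
          simpa using this
        have hresthd : ∀ z, rest.head? = some z → z ≠ "" := by
          intro z hz
          have h2 := List.head?_dropWhile_not (fun y => (y == "") == (x == "")) xs
          rw [← hrest, hz] at h2
          simp [hk] at h2
          exact h2
        simp only [List.flatMap_cons, hk, if_true, hih]
        rw [show pvCollapseF false (x :: xs) = "" :: pvCollapseF true xs by
              simp [pvCollapseF, hx]]
        rw [← hxs, pv_collapse_true_blanks run rest hrunb,
            pv_collapse_head_nonblank rest hresthd]
        rfl
      · have hk : (x == "") = false := by simp [hx]
        have hrunnb : ∀ y ∈ run, y ≠ "" := by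
          intro y hy
          have := List.mem_takeWhile_imp hy
          rw [hk] at this
          simpa using this
        simp only [List.flatMap_cons, hk, Bool.false_eq_true, if_false, hih]
        rw [show pvCollapseF false (x :: xs) = x :: pvCollapseF false xs by
              simp [pvCollapseF, hx]]
        rw [← hxs, pv_collapse_false_nonblanks run rest hrunnb]
        simp

-- ===== VERDICT (by name: the statement is the Claim_ definition above) =====
theorem clean_ttl_content_spec : Claim_equal_clean_ttl_content := by
  intro text _
  unfold Spec_clean_ttl_content clean_ttl_content clean_ttl_content_alt
  have hA := pv_foldA (PySem.Str.splitlines text) [] false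
  have hB := pv_groupby_collapse ((PySem.Str.splitlines text).filterMap pvKeep).length
      ((PySem.Str.splitlines text).filterMap pvKeep) (le_refl _)
  simp only [hA, hB, List.nil_append]
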